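-- pv_equiv track=rewrite | github.com/Astro-Sean/autophot | check.py | auto_accept_header_key
-- ===== SOURCE A (Python) =====
-- from typing import List, Dict, Any, Optional
--
-- auto_accept = {
--     "MJD": ["MJD-OBS", "MJD_OBS", "MJD", "MJDSTART", "OBSMJD"],
--     "Date": ["DATE-OBS", "DATEOBS", "UTC-OBS", "OBS-DATE"],
--     "EXPTIME": ["EXPTIME", "EXPOSURE", "TEXP", "EXPTIME0"],
-- }
--
-- def _header_key_ci(header: dict, canonical: str) -> Optional[str]:
--     """Return the actual header key matching ``canonical`` (case-insensitive), or None."""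
--     if not header:
--         return None
--     want = canonical.upper()
--     for k in header:
--         if str(k).upper() == want:
--             return str(k)
--     return None
--
-- def auto_accept_header_key(header: dict, logical_keyword: str) -> Optional[str]:
--     """
--     If ``logical_keyword`` is listed in ``auto_accept``, return the first matching
--     FITS key present in ``header`` (case-insensitive), else None.
--     """
--     candidates = auto_accept.get(logical_keyword)
--     if not candidates:
--         return None
--     for canon in candidates:
--         found = _header_key_ci(header, canon)
--         if found is not None:
--             return found
--     return None
-- ===== SOURCE B (Python) =====
-- auto_accept = {
--     "MJD": ["MJD-OBS", "MJD_OBS", "MJD", "MJDSTART", "OBSMJD"],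
--     "Date": ["DATE-OBS", "DATEOBS", "UTC-OBS", "OBS-DATE"],
--     "EXPTIME": ["EXPTIME", "EXPOSURE", "TEXP", "EXPTIME0"],
-- }
--
-- def auto_accept_header_key(header: dict, logical_keyword: str):
--     # Single pass over the header: rank each header key by the position of its
--     # uppercase form in the candidate list and keep the first key of minimal rank.
--     candidates = auto_accept.get(logical_keyword)
--     if not candidates:
--         return None
--     rank = {}
--     for i, c in enumerate(candidates):
--         rank.setdefault(c.upper(), i)
--     best_i = len(candidates)
--     best_k = None
--     for k in header:
--         r = rank.get(str(k).upper())
--         if r is not None and r < best_i: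
--             best_i = r
--             best_k = str(k)
--     return best_k
-- ===== Notes on version B (the rewrite author's own statement) =====
-- stated objective: alternative
-- what changed: B inverts the loop structure: instead of A's outer loop over candidate aliases each rescanning the header, B ranks each alias once (alias.upper() -> position) and makes a single pass over the header keeping the first header key of minimal alias rank.
import Mathlib
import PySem

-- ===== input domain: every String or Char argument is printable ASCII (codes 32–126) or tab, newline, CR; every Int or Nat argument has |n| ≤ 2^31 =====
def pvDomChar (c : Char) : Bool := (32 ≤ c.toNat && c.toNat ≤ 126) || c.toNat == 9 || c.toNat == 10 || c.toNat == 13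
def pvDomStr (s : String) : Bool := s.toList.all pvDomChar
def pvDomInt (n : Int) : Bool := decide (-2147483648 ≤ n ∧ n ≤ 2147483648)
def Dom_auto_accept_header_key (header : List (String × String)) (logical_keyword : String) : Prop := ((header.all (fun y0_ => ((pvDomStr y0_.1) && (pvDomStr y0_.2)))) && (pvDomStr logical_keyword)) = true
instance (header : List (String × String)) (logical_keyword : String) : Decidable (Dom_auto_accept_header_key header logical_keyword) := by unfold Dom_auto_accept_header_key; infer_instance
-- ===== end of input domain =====

-- B replaces A's outer loop over candidate aliases (each with a fresh case-insensitive
-- header scan) by ONE pass over the header that ranks each header key by its alias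
-- position and keeps the first key of minimal rank (objective: alternative).

-- shared module constant: the auto_accept table
def autoAccept : PySem.Dict String (List String) :=
  PySem.Dict.mk [("MJD", ["MJD-OBS", "MJD_OBS", "MJD", "MJDSTART", "OBSMJD"]),
                 ("Date", ["DATE-OBS", "DATEOBS", "UTC-OBS", "OBS-DATE"]),
                 ("EXPTIME", ["EXPTIME", "EXPOSURE", "TEXP", "EXPTIME0"])]

-- ===== PORT A =====
-- 'for k in header: if str(k).upper() == want: return str(k)'
def ciLoop (keys : List String) (want : String) : Option String :=
  match keys with
  | [] => none
  | k :: rest => if PySem.Str.upper k = want then some k else ciLoop rest want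

def headerKeyCi (header : List (String × String)) (canonical : String) : Option String :=
  if header = [] then none
  else ciLoop (header.map Prod.fst) (PySem.Str.upper canonical)

def candLoop (candidates : List String) (header : List (String × String)) : Option String :=
  match candidates with
  | [] => none
  | c :: rest =>
    match headerKeyCi header c with
    | some found => some found
    | none => candLoop rest header

def auto_accept_header_key (header : List (String × String)) (logical_keyword : String) : Option String :=
  match autoAccept.get? logical_keyword with
  | none => none
  | some candidates => if candidates = [] then none else candLoop candidates header

-- ===== PORT B =====
-- 'for i, c in enumerate(candidates): rank.setdefault(c.upper(), i)'
def rankDict (candidates : List String) : PySem.Dict String Int :=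
  (PySem.List.enumerate candidates).foldl
    (fun d ic => d.setdefault (PySem.Str.upper ic.2) ic.1) PySem.Dict.empty

-- 'for k in header: r = rank.get(str(k).upper()); if r is not None and r < best_i: …'
def bestStep (rank : PySem.Dict String Int) (st : Int × Option String) (kv : String × String) :
    Int × Option String :=
  match rank.get? (PySem.Str.upper kv.1) with
  | some r => if r < st.1 then (r, some kv.1) else st
  | none => st

def auto_accept_header_key_alt (header : List (String × String)) (logical_keyword : String) : Option String :=
  match autoAccept.get? logical_keyword with
  | none => none
  | some candidates =>
    if candidates = [] then none
    else
      let rank := rankDict candidates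
      (header.foldl (bestStep rank) ((candidates.length : Int), none)).2

-- ===== PRECONDITION & SPEC =====
def Spec_auto_accept_header_key (header : List (String × String)) (logical_keyword : String) (out : Option String) : Prop := out = auto_accept_header_key_alt header logical_keyword
instance (header : List (String × String)) (logical_keyword : String) (out : Option String) : Decidable (Spec_auto_accept_header_key header logical_keyword out) := by unfold Spec_auto_accept_header_key; infer_instance

-- ===== CLAIM (what is proved, stated in full; the proofs are below) =====
def Claim_equal_auto_accept_header_key : Prop := ∀ (header : List (String × String)) (logical_keyword : String), Dom_auto_accept_header_key header logical_keyword → Spec_auto_accept_header_key header logical_keyword (auto_accept_header_key header logical_keyword)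

-- ===== LEMMAS AND PROOFS =====

-- first index j with (candidates[j]).upper() = u
def rankIdx : List String → String → Option Nat
  | [], _ => none
  | c :: rest, u => if PySem.Str.upper c = u then some 0 else (rankIdx rest u).map (· + 1)

-- A's candidate loop, over the list of header keys
def candLoopK : List String → List String → Option String
  | [], _ => none
  | c :: rest, keys =>
    match ciLoop keys (PySem.Str.upper c) with
    | some k => some k
    | none => candLoopK rest keys

theorem candLoop_eq_candLoopK (cs : List String) (header : List (String × String)) :
    candLoop cs header = candLoopK cs (header.map Prod.fst) := by
  induction cs with
  | nil => rfl
  | cons c rest ih =>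
    simp only [candLoop, candLoopK, headerKeyCi]
    cases header with
    | nil => simpa [ciLoop] using ih
    | cons kv t => simp only [if_neg (List.cons_ne_nil kv t)]; rw [ih]

theorem get?_rank_foldl (cs : List String) (n : Int) (d : PySem.Dict String Int) (u : String) :
    ((PySem.List.enumerate cs n).foldl
      (fun d ic => d.setdefault (PySem.Str.upper ic.2) ic.1) d).get? u
    = (match d.get? u with
       | some v => some v
       | none => (rankIdx cs u).map (fun j => n + (j : Int))) := by
  induction cs generalizing n d with
  | nil =>
    simp only [PySem.List.enumerate_nil, List.foldl_nil, rankIdx]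
    cases d.get? u <;> rfl
  | cons c rest ih =>
    rw [PySem.List.enumerate_cons, List.foldl_cons, ih]
    by_cases hu : PySem.Str.upper c = u
    · subst hu
      rw [PySem.Dict.get?_setdefault_self]
      simp only [rankIdx]
      cases h : d.get? (PySem.Str.upper c) <;> simp [Option.getD]
    · rw [PySem.Dict.get?_setdefault_of_ne _ _ (fun h => hu h.symm)]
      simp only [rankIdx, if_neg hu]
      cases h : d.get? u
      · cases hr : rankIdx rest u <;> simp
        · ring
      · simp

theorem get?_rankDict (cs : List String) (u : String) :
    (rankDict cs).get? u
      = (match rankIdx cs u with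
         | some j => some ((j : Int))
         | none => none) := by
  unfold rankDict
  rw [get?_rank_foldl, PySem.Dict.get?_empty]
  cases rankIdx cs u <;> simp

theorem rankIdx_take (cs : List String) (i : Nat) (u : String) :
    rankIdx (cs.take i) u
      = (match rankIdx cs u with
         | some j => if j < i then some j else none
         | none => none) := by
  induction cs generalizing i with
  | nil => simp [rankIdx]
  | cons c rest ih =>
    cases i with
    | zero =>
      simp only [List.take_zero, rankIdx]
      by_cases hc : PySem.Str.upper c = u
      · simp [hc]
      · simp only [if_neg hc]
        cases hr : rankIdx rest u <;> simp
    | succ i =>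
      simp only [List.take_succ_cons, rankIdx]
      by_cases hc : PySem.Str.upper c = u
      · simp [hc]
      · rw [if_neg hc, if_neg hc, ih]
        cases hr : rankIdx rest u
        · simp
        · rename_i j
          simp only [Option.map_some]
          by_cases hj : j < i
          · simp only [if_pos hj, if_pos (show j + 1 < i + 1 by omega), Option.map_some]
          · simp only [if_neg hj, if_neg (show ¬ j + 1 < i + 1 by omega), Option.map_none]

theorem candLoopK_cons_key (cands : List String) (k : String) (keys : List String) :
    candLoopK cands (k :: keys)
      = (match rankIdx cands (PySem.Str.upper k) with
         | none => candLoopK cands keys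
         | some j =>
           (match candLoopK (cands.take j) keys with
            | some k' => some k'
            | none => some k)) := by
  induction cands with
  | nil => rfl
  | cons c rest ih =>
    simp only [candLoopK, ciLoop, rankIdx]
    by_cases h : PySem.Str.upper k = PySem.Str.upper c
    · rw [if_pos h, if_pos h.symm]
      simp [candLoopK]
    · rw [if_neg h, if_neg (fun e => h e.symm)]
      cases hr : rankIdx rest (PySem.Str.upper k)
      · simp only [Option.map_none]
        cases hc : ciLoop keys (PySem.Str.upper c) <;> simp [ih, hr]
      · rename_i j
        simp only [Option.map_some, List.take_succ_cons, candLoopK]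
        cases hc : ciLoop keys (PySem.Str.upper c) <;> simp [ih, hr]

theorem candLoopK_nil_keys (cands : List String) : candLoopK cands [] = none := by
  induction cands with
  | nil => rfl
  | cons c rest ih => simp [candLoopK, ciLoop, ih]

theorem best_fold (cs : List String) (keys : List (String × String)) :
    ∀ (i : Nat) (bk : Option String),
      (keys.foldl (bestStep (rankDict cs)) ((i : Int), bk)).2
        = (match candLoopK (cs.take i) (keys.map Prod.fst) with
           | some k' => some k'
           | none => bk) := by
  induction keys with
  | nil => intro i bk; simp [candLoopK_nil_keys]
  | cons kv t ih =>
    intro i bk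
    rw [List.map_cons, candLoopK_cons_key, List.foldl_cons]
    cases hr : rankIdx cs (PySem.Str.upper kv.1) with
    | none =>
      simp only [bestStep, get?_rankDict, rankIdx_take, hr]
      exact ih i bk
    | some j =>
      simp only [bestStep, get?_rankDict, rankIdx_take, hr]
      by_cases hj : j < i
      · simp only [if_pos hj, if_pos (show ((j:Nat) : Int) < ((i:Nat) : Int) by exact_mod_cast hj)]
        rw [ih j (some kv.1), List.take_take, min_eq_left (le_of_lt hj)]
        cases candLoopK (cs.take j) (t.map Prod.fst) <;> rfl
      · simp only [if_neg hj, if_neg (show ¬ ((j:Nat) : Int) < ((i:Nat) : Int) by exact_mod_cast hj)]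
        exact ih i bk

-- ===== VERDICT (by name: the statement is the Claim_ definition above) =====
theorem auto_accept_header_key_spec : Claim_equal_auto_accept_header_key := by
  intro header logical_keyword _
  unfold Spec_auto_accept_header_key auto_accept_header_key auto_accept_header_key_alt
  cases autoAccept.get? logical_keyword with
  | none => rfl
  | some candidates =>
    by_cases h : candidates = []
    · simp [h]
    · simp only [if_neg h]
      rw [best_fold candidates header candidates.length none, List.take_length,
        candLoop_eq_candLoopK]
      cases candLoopK candidates (header.map Prod.fst) <;> rfl
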